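-- pv_equiv track=rewrite | github.com/tenstorrent/tt-forge-fe | forge/forge/tvm_calls/relay/op/utils.py | match_einsum_pattern
-- ===== SOURCE A (Python) =====
-- def match_einsum_pattern(pattern, query):
--     query = query.replace(" ", "")
--     pattern = pattern.replace(" ", "")
--     if len(query) != len(pattern):
--         return False
--
--     query_dict = {}
--     for char in query:
--         query_dict[char] = []
--
--     for i in range(len(query)):
--         char = query[i]
--         query_dict[char].append(i)
--
--     pattern_dict = {}
--     for char in pattern:
--         pattern_dict[char] = []
--
--     for i in range(len(pattern)):
--         char = pattern[i]
--         pattern_dict[char].append(i)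
--
--     return sorted(list(query_dict.values())) == sorted(list(pattern_dict.values()))
-- ===== SOURCE B (Python) =====
-- def match_einsum_pattern(pattern, query):
--     query = query.replace(" ", "")
--     pattern = pattern.replace(" ", "")
--     if len(query) != len(pattern):
--         return False
--     return [query.index(c) for c in query] == [pattern.index(c) for c in pattern]
-- ===== Notes on version B (the rewrite author's own statement) =====
-- stated objective: simpler
-- what changed: Replaces the build-two-position-list-dicts-then-compare-sorted-values strategy with a direct comparison of first-occurrence fingerprints: [s.index(c) for c in s] for both strings.
import Mathlib
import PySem

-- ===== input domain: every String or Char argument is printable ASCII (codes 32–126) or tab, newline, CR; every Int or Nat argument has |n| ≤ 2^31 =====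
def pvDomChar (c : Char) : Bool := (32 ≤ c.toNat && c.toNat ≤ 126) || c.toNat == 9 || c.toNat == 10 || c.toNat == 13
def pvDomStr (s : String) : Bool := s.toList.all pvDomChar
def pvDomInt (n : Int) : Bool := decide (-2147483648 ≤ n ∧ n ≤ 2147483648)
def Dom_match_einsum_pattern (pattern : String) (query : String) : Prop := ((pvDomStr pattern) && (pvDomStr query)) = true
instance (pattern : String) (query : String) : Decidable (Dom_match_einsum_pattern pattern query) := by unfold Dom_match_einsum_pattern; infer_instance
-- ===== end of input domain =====

-- B replaces A's build-position-dicts-then-compare-sorted-values strategy by a direct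
-- comparison of first-occurrence fingerprints [s.index(c) for c in s]; objective: simpler.

-- ===== PORT A =====
def match_einsum_pattern (pattern : String) (query : String) : Bool :=
  let query := PySem.Str.replace query " " ""
  let pattern := PySem.Str.replace pattern " " ""
  if PySem.Str.len query ≠ PySem.Str.len pattern then false
  else
    -- query_dict = {}; for char in query: query_dict[char] = []
    let qd : PySem.Dict Char (List Int) :=
      query.toList.foldl (fun d c => d.insert c []) PySem.Dict.empty
    -- for i in range(len(query)): query_dict[query[i]].append(i)   (query[i] is always in range)
    let qd := (PySem.List.pyRange 0 (PySem.Str.len query) 1).foldl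
      (fun d i => d.modify (PySem.List.pyGetD query.toList i ' ') [] (· ++ [i])) qd
    let pd : PySem.Dict Char (List Int) :=
      pattern.toList.foldl (fun d c => d.insert c []) PySem.Dict.empty
    let pd := (PySem.List.pyRange 0 (PySem.Str.len pattern) 1).foldl
      (fun d i => d.modify (PySem.List.pyGetD pattern.toList i ' ') [] (· ++ [i])) pd
    -- sorted(list(query_dict.values())) == sorted(list(pattern_dict.values()))
    decide (PySem.List.sorted qd.values (fun x => x) false
          = PySem.List.sorted pd.values (fun x => x) false)

-- ===== PORT B =====
def match_einsum_pattern_alt (pattern : String) (query : String) : Bool :=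
  let query := PySem.Str.replace query " " ""
  let pattern := PySem.Str.replace pattern " " ""
  if PySem.Str.len query ≠ PySem.Str.len pattern then false
  else
    -- s.index(c) with c drawn from s itself never raises; exact as Chars.find there
    decide (query.toList.map (fun c => PySem.Chars.find query.toList [c])
          = pattern.toList.map (fun c => PySem.Chars.find pattern.toList [c]))

-- ===== PRECONDITION & SPEC =====
def Spec_match_einsum_pattern (pattern : String) (query : String) (out : Bool) : Prop := out = match_einsum_pattern_alt pattern query
instance (pattern : String) (query : String) (out : Bool) : Decidable (Spec_match_einsum_pattern pattern query out) := by unfold Spec_match_einsum_pattern; infer_instance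

-- ===== CLAIM (what is proved, stated in full; the proofs are below) =====
def Claim_equal_match_einsum_pattern : Prop := ∀ (pattern : String) (query : String), Dom_match_einsum_pattern pattern query → Spec_match_einsum_pattern pattern query (match_einsum_pattern pattern query)

-- ===== LEMMAS AND PROOFS =====

def posA (cs : List Char) (c : Char) : List Int :=
  (PySem.List.pyRange 0 (cs.length : Int) 1).filter
    (fun i => PySem.List.pyGetD cs i ' ' == c)

lemma mem_posA {cs : List Char} {c : Char} {i : Int} :
    i ∈ posA cs c ↔ 0 ≤ i ∧ i < (cs.length : Int) ∧ PySem.List.pyGetD cs i ' ' = c := by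
  simp [posA, List.mem_filter, PySem.List.mem_pyRange_one]; tauto

lemma mem_posA_nat {cs : List Char} {c : Char} {k : Nat} (hk : k < cs.length) :
    (k : Int) ∈ posA cs c ↔ cs[k] = c := by
  rw [mem_posA]
  have : PySem.List.pyGetD cs (k : Int) ' ' = cs[k] := by
    simp [PySem.List.pyGetD_natCast, hk]
  simp [this, hk]

lemma pairwise_posA (cs : List Char) (c : Char) : (posA cs c).Pairwise (· < ·) :=
  (PySem.List.pairwise_lt_pyRange_one 0 (cs.length : Int)).filter _

lemma single_prefix {c : Char} {l : List Char} : [c] <+: l ↔ l.head? = some c := by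
  cases l with
  | nil => simp
  | cons a t => simp [List.cons_prefix_iff]

lemma single_infix_of_mem {c : Char} {l : List Char} (h : c ∈ l) : [c] <:+: l := by
  obtain ⟨s, t, rfl⟩ := List.mem_iff_append.mp h
  exact ⟨s, t, by simp⟩

lemma find_nonneg_of_mem {cs : List Char} {c : Char} (hc : c ∈ cs) :
    0 ≤ PySem.Chars.find cs [c] :=
  (PySem.Chars.find_nonneg_iff cs [c]).mpr (single_infix_of_mem hc)

lemma find_mem_posA {cs : List Char} {c : Char} (hc : c ∈ cs) :
    PySem.Chars.find cs [c] ∈ posA cs c := by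
  have h0 := find_nonneg_of_mem hc
  obtain ⟨hpre, hmin⟩ := PySem.Chars.find_spec h0
  rw [single_prefix, List.head?_drop] at hpre
  have hlt : (PySem.Chars.find cs [c]).toNat < cs.length := (List.getElem?_eq_some_iff.mp hpre).1
  have hm : ((PySem.Chars.find cs [c]).toNat : Int) ∈ posA cs c := by
    rw [mem_posA_nat hlt]
    have := List.getElem?_eq_getElem hlt
    rw [this] at hpre
    exact Option.some.inj hpre
  simpa [Int.toNat_of_nonneg h0] using hm

lemma find_min_posA {cs : List Char} {c : Char} {i : Int} (hi : i ∈ posA cs c) :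
    PySem.Chars.find cs [c] ≤ i := by
  obtain ⟨h0, hlt, hg⟩ := mem_posA.mp hi
  have hget : cs[i.toNat]'(by omega) = c := by
    rw [← PySem.List.pyGetD_eq_getElem cs ' ' h0 hlt]; exact hg
  have hc : c ∈ cs := hget ▸ List.getElem_mem _
  have hf0 := find_nonneg_of_mem hc
  by_contra hlt2
  rw [Int.not_le] at hlt2
  obtain ⟨hpre, hmin⟩ := PySem.Chars.find_spec hf0
  apply hmin i.toNat (by omega)
  rw [single_prefix, List.head?_drop, List.getElem?_eq_getElem (by omega : i.toNat < cs.length), hget]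

lemma find_eq_of_posA_eq {cs ds : List Char} {c e : Char} (hc : c ∈ cs) (he : e ∈ ds)
    (h : posA cs c = posA ds e) : PySem.Chars.find cs [c] = PySem.Chars.find ds [e] := by
  have h1 := find_min_posA (h ▸ find_mem_posA hc)
  have h2 := find_min_posA (h.symm ▸ find_mem_posA he)
  omega

lemma posA_inj {cs : List Char} {c e : Char} (hc : c ∈ cs)
    (h : posA cs c = posA cs e) : c = e := by
  have hm := h ▸ find_mem_posA hc
  have h1 := (mem_posA.mp (find_mem_posA hc)).2.2
  have h2 := (mem_posA.mp hm).2.2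
  rw [h1] at h2; exact h2

lemma getD_char_of_find {cs : List Char} {c : Char} (hc : c ∈ cs) :
    PySem.List.pyGetD cs (PySem.Chars.find cs [c]) ' ' = c :=
  (mem_posA.mp (find_mem_posA hc)).2.2

lemma char_eq_iff_find_eq {cs : List Char} {j k : Nat} (hj : j < cs.length) (hk : k < cs.length) :
    cs[j] = cs[k] ↔ PySem.Chars.find cs [cs[j]] = PySem.Chars.find cs [cs[k]] := by
  constructor
  · intro h; rw [h]
  · intro h
    have h1 := getD_char_of_find (List.getElem_mem hj)
    have h2 := getD_char_of_find (List.getElem_mem hk)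
    rw [h] at h1
    exact h1.symm.trans h2

lemma posA_nodup (cs : List Char) (c : Char) : (posA cs c).Nodup :=
  (pairwise_posA cs c).imp (fun h => ne_of_lt h)

lemma posA_ext {cs ds : List Char} {c e : Char}
    (h : ∀ i : Int, i ∈ posA cs c ↔ i ∈ posA ds e) : posA cs c = posA ds e := by
  exact List.Perm.eq_of_pairwise
    (fun a b _ _ hab hba => le_antisymm hab hba)
    ((pairwise_posA cs c).imp le_of_lt) ((pairwise_posA ds e).imp le_of_lt)
    ((List.perm_ext_iff_of_nodup (posA_nodup cs c) (posA_nodup ds e)).mpr h)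

lemma core (qs ps : List Char) (hlen : qs.length = ps.length) :
    ((PySem.Set.ofList qs).map (posA qs)).Perm ((PySem.Set.ofList ps).map (posA ps))
    ↔ qs.map (fun c => PySem.Chars.find qs [c]) = ps.map (fun c => PySem.Chars.find ps [c]) := by
  constructor
  · intro hperm
    apply List.ext_getElem (by simp [hlen])
    intro k hk1 hk2
    simp only [List.getElem_map]
    have hkq : k < qs.length := by simpa using hk1
    have hkp : k < ps.length := by simpa using hk2
    have hq : posA qs qs[k] ∈ (PySem.Set.ofList qs).map (posA qs) :=
      List.mem_map_of_mem ((PySem.Set.mem_ofList qs _).mpr (List.getElem_mem hkq))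
    obtain ⟨e, hemem, heq⟩ := List.mem_map.mp (hperm.mem_iff.mp hq)
    have hkmem : (k : Int) ∈ posA qs qs[k] := (mem_posA_nat hkq).mpr rfl
    have : (k : Int) ∈ posA ps e := heq ▸ hkmem
    have hce : ps[k] = e := (mem_posA_nat hkp).mp this
    have hpos : posA qs qs[k] = posA ps ps[k] := by rw [hce]; exact heq.symm
    exact find_eq_of_posA_eq (List.getElem_mem hkq) (List.getElem_mem hkp) hpos
  · intro hmap
    have hfind : ∀ k : Nat, (hk : k < qs.length) →
        PySem.Chars.find qs [qs[k]] = PySem.Chars.find ps [ps[k]'(by omega)] := by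
      intro k hk
      have h1 : (qs.map (fun c => PySem.Chars.find qs [c]))[k]'(by simpa using hk)
              = (ps.map (fun c => PySem.Chars.find ps [c]))[k]'(by simp; omega) := by
        simp only [hmap]
      simpa using h1
    have hkey : ∀ k : Nat, (hk : k < qs.length) →
        posA qs (qs[k]) = posA ps (ps[k]'(by omega)) := by
      intro k hk
      apply posA_ext
      intro i
      constructor
      · intro hi
        obtain ⟨h0, hlt, hg⟩ := mem_posA.mp hi
        have hj : i.toNat < qs.length := by omega
        have hji : ((i.toNat : Nat) : Int) = i := Int.toNat_of_nonneg h0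
        have hcq : qs[i.toNat] = qs[k] := by
          rw [← PySem.List.pyGetD_eq_getElem qs ' ' h0 hlt]; exact hg
        have hfq := (char_eq_iff_find_eq hj hk).mp hcq
        rw [hfind i.toNat hj, hfind k hk] at hfq
        have hcp : ps[i.toNat]'(by omega) = ps[k]'(by omega) :=
          (char_eq_iff_find_eq (by omega) (by omega)).mpr hfq
        rw [← hji, mem_posA_nat (by omega)]
        exact hcp
      · intro hi
        obtain ⟨h0, hlt, hg⟩ := mem_posA.mp hi
        have hj : i.toNat < ps.length := by omega
        have hji : ((i.toNat : Nat) : Int) = i := Int.toNat_of_nonneg h0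
        have hcp : ps[i.toNat] = ps[k]'(by omega) := by
          rw [← PySem.List.pyGetD_eq_getElem ps ' ' h0 hlt]; exact hg
        have hfp := (char_eq_iff_find_eq hj (by omega)).mp hcp
        rw [← hfind i.toNat (by omega), ← hfind k hk] at hfp
        have hcq : qs[i.toNat]'(by omega) = qs[k] :=
          (char_eq_iff_find_eq (by omega) hk).mpr hfp
        rw [← hji, mem_posA_nat (by omega)]
        exact hcq
    have hnodq : ((PySem.Set.ofList qs).map (posA qs)).Nodup :=
      List.Nodup.map_on
        (fun x hx y hy hxy => posA_inj ((PySem.Set.mem_ofList qs x).mp hx) hxy)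
        (PySem.Set.nodup_ofList qs)
    have hnodp : ((PySem.Set.ofList ps).map (posA ps)).Nodup :=
      List.Nodup.map_on
        (fun x hx y hy hxy => posA_inj ((PySem.Set.mem_ofList ps x).mp hx) hxy)
        (PySem.Set.nodup_ofList ps)
    rw [List.perm_ext_iff_of_nodup hnodq hnodp]
    intro x
    constructor
    · intro hx
      obtain ⟨c, hcmem, rfl⟩ := List.mem_map.mp hx
      obtain ⟨k, hk, rfl⟩ := List.getElem_of_mem ((PySem.Set.mem_ofList qs c).mp hcmem)
      exact List.mem_map.mpr ⟨ps[k]'(by omega),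
        (PySem.Set.mem_ofList ps _).mpr (List.getElem_mem _), (hkey k hk).symm⟩
    · intro hx
      obtain ⟨c, hcmem, rfl⟩ := List.mem_map.mp hx
      obtain ⟨k, hk, rfl⟩ := List.getElem_of_mem ((PySem.Set.mem_ofList ps c).mp hcmem)
      exact List.mem_map.mpr ⟨qs[k]'(by omega),
        (PySem.Set.mem_ofList qs _).mpr (List.getElem_mem _), hkey k (by omega)⟩

lemma getD_insertLoop_gen (cs : List Char) (d : PySem.Dict Char (List Int))
    (h : ∀ x, d.getD x [] = []) (c : Char) :
    ((cs.foldl (fun d c => d.insert c ([] : List Int)) d)).getD c [] = [] := by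
  induction cs generalizing d with
  | nil => exact h c
  | cons a t ih =>
      refine ih _ (fun x => ?_)
      rw [PySem.Dict.getD_insert]
      split <;> simp [h]

lemma getD_insertLoop (cs : List Char) (c : Char) :
    ((cs.foldl (fun d c => d.insert c ([] : List Int)) PySem.Dict.empty)).getD c [] = [] :=
  getD_insertLoop_gen cs _ (fun x => by simp [PySem.Dict.getD_empty]) c

lemma getD_appendLoop (cs : List Char) (d : PySem.Dict Char (List Int)) (c : Char) :
    ((PySem.List.pyRange 0 (cs.length : Int) 1).foldl
      (fun d i => d.modify (PySem.List.pyGetD cs i ' ') [] (· ++ [i])) d).getD c []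
    = d.getD c [] ++ posA cs c := by
  have hmap : (PySem.List.pyRange 0 (cs.length : Int) 1).foldl
      (fun d i => d.modify (PySem.List.pyGetD cs i ' ') [] (· ++ [i])) d
    = (((PySem.List.pyRange 0 (cs.length : Int) 1).map
        (fun i => (PySem.List.pyGetD cs i ' ', i))).foldl
      (fun d p => d.modify p.1 [] (· ++ [p.2])) d) := by
    rw [List.foldl_map]
  rw [hmap, PySem.Dict.getD_foldl_modify_append]
  congr 1
  rw [List.filter_map]
  rw [List.map_map]
  simp only [posA, Function.comp_def]
  simp

lemma keys_dict (cs : List Char) :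
    ((PySem.List.pyRange 0 (cs.length : Int) 1).foldl
      (fun d i => d.modify (PySem.List.pyGetD cs i ' ') [] (· ++ [i]))
      (cs.foldl (fun d c => d.insert c ([] : List Int)) PySem.Dict.empty)).keys
    = PySem.Set.ofList cs := by
  rw [PySem.Dict.keys_foldl_modify_key _ (fun i => PySem.List.pyGetD cs i ' ') _
        (fun _ i => (· ++ [i]))]
  rw [PySem.Dict.keys_foldl_insert]
  rw [PySem.List.map_pyGetD_pyRange_zero']
  simp [PySem.Dict.keys_empty, PySem.Set.update_nil_left]
  rw [PySem.Set.update_eq_append_filter]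
  have : (PySem.Set.ofList cs).filter (fun y => !(PySem.Set.contains (PySem.Set.ofList cs) y)) = [] := by
    apply List.filter_eq_nil_iff.mpr
    intro a ha
    have := (PySem.Set.mem_ofList cs a).mp ha
    simp [this]
  rw [this, List.append_nil]

lemma nodup_keys_dict (cs : List Char) :
    ((PySem.List.pyRange 0 (cs.length : Int) 1).foldl
      (fun d i => d.modify (PySem.List.pyGetD cs i ' ') [] (· ++ [i]))
      (cs.foldl (fun d c => d.insert c ([] : List Int)) PySem.Dict.empty)).keys.Nodup := by
  apply PySem.Dict.nodup_keys_foldl_modify_key _ (fun i => PySem.List.pyGetD cs i ' ') _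
        (fun _ i => (· ++ [i]))
  apply PySem.Dict.nodup_keys_foldl_insert
  simp [PySem.Dict.keys_empty]

lemma values_dict (cs : List Char) :
    ((PySem.List.pyRange 0 (cs.length : Int) 1).foldl
      (fun d i => d.modify (PySem.List.pyGetD cs i ' ') [] (· ++ [i]))
      (cs.foldl (fun d c => d.insert c ([] : List Int)) PySem.Dict.empty)).values
    = (PySem.Set.ofList cs).map (posA cs) := by
  rw [PySem.Dict.values_eq_map_keys _ (nodup_keys_dict cs) []]
  rw [keys_dict]
  apply List.map_congr_left
  intro c _
  rw [getD_appendLoop, getD_insertLoop, List.nil_append]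

-- ===== VERDICT (by name: the statement is the Claim_ definition above) =====
set_option maxHeartbeats 1000000 in
theorem match_einsum_pattern_spec : Claim_equal_match_einsum_pattern := by
  intro pattern query _
  unfold Spec_match_einsum_pattern match_einsum_pattern match_einsum_pattern_alt
  dsimp only
  split_ifs with h
  · rfl
  · have hlen : (PySem.Str.replace query " " "").toList.length
        = (PySem.Str.replace pattern " " "").toList.length := by
      rw [not_not] at h
      rw [PySem.Str.len_eq, PySem.Str.len_eq] at h
      exact_mod_cast h
    simp only [PySem.Str.len_eq]
    apply decide_eq_decide.mpr
    rw [values_dict, values_dict]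
    have e : (fun (a b : List Int) => a.decidableLT b)
        = (LinearOrder.toDecidableLT : DecidableLT (List Int)) := by
      funext a b; exact Subsingleton.elim _ _
    rw [e]
    exact (PySem.List.sorted_id_eq_sorted_id_iff_perm _ _).trans (core _ _ hlen)
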